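-- pv_equiv track=rewrite | github.com/maslonfcb/Programaci-n-Avanzada | skip_list_explicativa.py | build_levels
-- ===== SOURCE A (Python) =====
-- from typing import List, Dict, Optional, Tuple
--
-- MIN_VALUE = 1
--
-- MAX_VALUE = 1000
--
-- LEVELS = 5
--
-- LEVEL_STEPS = {4: 200, 3: 100, 2: 20, 1: 5, 0: 1}
--
-- def build_levels(min_v: int = MIN_VALUE, max_v: int = MAX_VALUE) -> Dict[int, List[int]]:
--     base = list(range(min_v, max_v + 1))
--     levels = {}
--     for lvl in range(LEVELS):
--         step = LEVEL_STEPS[lvl]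
--         if step == 1:
--             levels[lvl] = base.copy()
--         else:
--             levels[lvl] = [v for v in base if v % step == 0]
--     return levels
-- ===== SOURCE B (Python) =====
-- from typing import List, Dict, Optional, Tuple
--
-- MIN_VALUE = 1
--
-- MAX_VALUE = 1000
--
-- LEVELS = 5
--
-- LEVEL_STEPS = {4: 200, 3: 100, 2: 20, 1: 5, 0: 1}
--
-- # Each level keyed by its step, in increasing level order.
-- STEPS = [(0, 1), (1, 5), (2, 20), (3, 100), (4, 200)]
--
-- def build_levels(min_v: int = MIN_VALUE, max_v: int = MAX_VALUE) -> Dict[int, List[int]]: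
--     # Each level is the strided range starting at the smallest multiple of step >= min_v.
--     return {lvl: list(range(min_v + (-min_v) % step, max_v + 1, step))
--             for lvl, step in STEPS}
-- ===== Notes on version B (the rewrite author's own statement) =====
-- stated objective: alternative
-- what changed: B builds the whole dict in one comprehension over a literal (level, step) table, generating each level directly as a strided range starting at the smallest multiple of step >= min_v (min_v + (-min_v) % step), instead of A's loop over range(LEVELS) with a per-level dict lookup that materialises the full base range and filters it by modulus.
import Mathlib
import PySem

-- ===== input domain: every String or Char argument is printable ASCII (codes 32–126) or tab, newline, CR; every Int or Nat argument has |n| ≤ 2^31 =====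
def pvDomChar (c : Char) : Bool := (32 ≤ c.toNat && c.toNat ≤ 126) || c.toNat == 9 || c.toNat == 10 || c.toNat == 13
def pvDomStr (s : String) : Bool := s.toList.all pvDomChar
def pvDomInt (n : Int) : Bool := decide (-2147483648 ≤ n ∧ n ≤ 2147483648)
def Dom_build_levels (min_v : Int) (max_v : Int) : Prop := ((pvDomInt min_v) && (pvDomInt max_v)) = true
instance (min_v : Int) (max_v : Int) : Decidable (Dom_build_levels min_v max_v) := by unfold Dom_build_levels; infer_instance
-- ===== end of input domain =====

-- B builds the dict in one comprehension over a literal (level, step) table, each level a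
-- strided range from the smallest multiple of step ≥ min_v (min_v + (-min_v) % step),
-- instead of A's loop over range(LEVELS) with dict lookups that filters the full base
-- range by modulus; alternative construction of the same result.

def LEVELS : Int := 5

def LEVEL_STEPS : PySem.Dict Int Int :=
  PySem.Dict.ofList [(4, 200), (3, 100), (2, 20), (1, 5), (0, 1)]

-- ===== PORT A =====
def build_levels (min_v : Int) (max_v : Int) : List (Int × List Int) :=
  let base := PySem.List.pyRange min_v (max_v + 1) 1
  ((PySem.List.pyRange 0 LEVELS 1).foldl (fun (levels : PySem.Dict Int (List Int)) lvl =>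
      let step := PySem.Dict.getD LEVEL_STEPS lvl 0
      if step == 1 then
        PySem.Dict.insert levels lvl base
      else
        PySem.Dict.insert levels lvl (base.filter (fun v => PySem.Int.mod v step == 0)))
    (PySem.Dict.ofList [])).items

-- ===== PORT B =====
def STEPS : List (Int × Int) := [(0, 1), (1, 5), (2, 20), (3, 100), (4, 200)]

-- dict comprehension over STEPS: keys come from STEPS in order (all distinct),
-- so it is PySem.Dict.ofList of the mapped pairs.
def build_levels_alt (min_v : Int) (max_v : Int) : List (Int × List Int) :=
  (PySem.Dict.ofList (STEPS.map (fun p =>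
      (p.1, PySem.List.pyRange (min_v + PySem.Int.mod (-min_v) p.2) (max_v + 1) p.2)))).items

-- ===== PRECONDITION & SPEC =====
def Spec_build_levels (min_v : Int) (max_v : Int) (out : List (Int × List Int)) : Prop := out = build_levels_alt min_v max_v
instance (min_v : Int) (max_v : Int) (out : List (Int × List Int)) : Decidable (Spec_build_levels min_v max_v out) := by unfold Spec_build_levels; infer_instance

-- ===== CLAIM (what is proved, stated in full; the proofs are below) =====
def Claim_equal_build_levels : Prop := ∀ (min_v : Int) (max_v : Int), Dom_build_levels min_v max_v → Spec_build_levels min_v max_v (build_levels min_v max_v)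

-- ===== LEMMAS AND PROOFS =====

-- B's start value min_v + (-min_v) % s equals the ceiling multiple -((-min_v) // s) * s.
lemma start_eq (a s : Int) : a + PySem.Int.mod (-a) s = -(PySem.Int.floordiv (-a) s) * s := by
  have h := PySem.Int.floordiv_mul_add_mod (-a) s
  linarith [h]

-- The smallest multiple of s that is ≥ a, computed as Python's -(-a // s) * s.
lemma start_bounds (a s : Int) (hs : 0 < s) :
    (-(PySem.Int.floordiv (-a) s) - 1) * s < a ∧ a ≤ -(PySem.Int.floordiv (-a) s) * s := by
  have := (PySem.Int.neg_floordiv_neg_eq_iff_of_pos (a := a) (q := -(PySem.Int.floordiv (-a) s)) hs).mp rfl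
  exact this

-- Filtering the unit range by divisibility equals the strided range from the first multiple.
lemma filter_mod_eq_strided (a b s : Int) (hs : 0 < s) :
    (PySem.List.pyRange a b 1).filter (fun v => PySem.Int.mod v s == 0) =
      PySem.List.pyRange (-(PySem.Int.floordiv (-a) s) * s) b s := by
  obtain ⟨hlt, hle⟩ := start_bounds a s hs
  set q : Int := -(PySem.Int.floordiv (-a) s) with hq
  have hdvdq : s ∣ q * s := Dvd.intro_left q rfl
  have hnod₁ : ((PySem.List.pyRange a b 1).filter (fun v => PySem.Int.mod v s == 0)).Nodup :=
    (PySem.List.nodup_pyRange_one a b).filter _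
  have hpair₁ : List.Pairwise (· < ·) ((PySem.List.pyRange a b 1).filter (fun v => PySem.Int.mod v s == 0)) :=
    (PySem.List.pairwise_lt_pyRange_one a b).filter _
  have hpair₂ : List.Pairwise (· < ·) (PySem.List.pyRange (q * s) b s) := by
    rw [PySem.List.pyRange_of_pos _ _ hs]
    refine List.pairwise_map.mpr ?_
    refine (List.pairwise_lt_range).imp ?_
    intro i j hij
    have : (s : Int) * i < s * j := by
      have : (i : Int) < j := by exact_mod_cast hij
      exact mul_lt_mul_of_pos_left this hs
    omega
  have hnod₂ : (PySem.List.pyRange (q * s) b s).Nodup := hpair₂.nodup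
  have hmem : ∀ x : Int, x ∈ (PySem.List.pyRange a b 1).filter (fun v => PySem.Int.mod v s == 0) ↔
      x ∈ PySem.List.pyRange (q * s) b s := by
    intro x
    rw [List.mem_filter, PySem.List.mem_pyRange_one, PySem.List.mem_pyRange_iff_of_pos hs]
    simp only [beq_iff_eq, PySem.Int.mod_eq_zero_iff_dvd]
    constructor
    · rintro ⟨⟨hax, hxb⟩, hdvd⟩
      obtain ⟨k, hk⟩ := hdvd
      refine ⟨?_, hxb, ?_⟩
      · have hk1 : (q - 1) * s < s * k := by omega
        have : q - 1 < k := by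
          by_contra hcon
          push Not at hcon
          have : s * k ≤ s * (q - 1) := mul_le_mul_of_nonneg_left hcon (le_of_lt hs)
          nlinarith
        have : q ≤ k := by omega
        have : q * s ≤ k * s := mul_le_mul_of_nonneg_right this (le_of_lt hs)
        have hcomm : k * s = s * k := mul_comm k s
        omega
      · exact dvd_sub ⟨k, hk⟩ hdvdq
    · rintro ⟨hqx, hxb, hdvd⟩
      refine ⟨⟨by omega, hxb⟩, ?_⟩
      have : x = (x - q * s) + q * s := by ring
      rw [this]
      exact dvd_add hdvd hdvdq
  have hperm : ((PySem.List.pyRange a b 1).filter (fun v => PySem.Int.mod v s == 0)).Perm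
      (PySem.List.pyRange (q * s) b s) :=
    (List.perm_ext_iff_of_nodup hnod₁ hnod₂).mpr hmem
  exact List.Perm.eq_of_pairwise (fun x _ _ _ h1 h2 => absurd (h1.trans h2) (lt_irrefl x)) hpair₁ hpair₂ hperm

lemma level_eq (a b s : Int) (hs : 0 < s) :
    (PySem.List.pyRange a b 1).filter (fun v => PySem.Int.mod v s == 0) =
      PySem.List.pyRange (a + PySem.Int.mod (-a) s) b s := by
  rw [start_eq, filter_mod_eq_strided a b s hs]

lemma level_one (a b : Int) :
    PySem.List.pyRange (a + PySem.Int.mod (-a) 1) b 1 = PySem.List.pyRange a b 1 := by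
  have h1 : PySem.Int.mod (-a) 1 = 0 := by
    have h0 := PySem.Int.mod_nonneg (a := -a) (b := 1) (by norm_num)
    have h2 := PySem.Int.mod_lt (a := -a) (b := 1) (by norm_num)
    omega
  rw [h1, add_zero]

-- ===== VERDICT (by name: the statement is the Claim_ definition above) =====
theorem build_levels_spec : Claim_equal_build_levels := by
  intro min_v max_v _
  show build_levels min_v max_v = build_levels_alt min_v max_v
  have hA : build_levels min_v max_v =
      [(0, PySem.List.pyRange min_v (max_v + 1) 1),
       (1, (PySem.List.pyRange min_v (max_v + 1) 1).filter (fun v => PySem.Int.mod v 5 == 0)),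
       (2, (PySem.List.pyRange min_v (max_v + 1) 1).filter (fun v => PySem.Int.mod v 20 == 0)),
       (3, (PySem.List.pyRange min_v (max_v + 1) 1).filter (fun v => PySem.Int.mod v 100 == 0)),
       (4, (PySem.List.pyRange min_v (max_v + 1) 1).filter (fun v => PySem.Int.mod v 200 == 0))] := rfl
  have hB : build_levels_alt min_v max_v =
      [(0, PySem.List.pyRange (min_v + PySem.Int.mod (-min_v) 1) (max_v + 1) 1),
       (1, PySem.List.pyRange (min_v + PySem.Int.mod (-min_v) 5) (max_v + 1) 5),
       (2, PySem.List.pyRange (min_v + PySem.Int.mod (-min_v) 20) (max_v + 1) 20),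
       (3, PySem.List.pyRange (min_v + PySem.Int.mod (-min_v) 100) (max_v + 1) 100),
       (4, PySem.List.pyRange (min_v + PySem.Int.mod (-min_v) 200) (max_v + 1) 200)] := rfl
  rw [hA, hB, level_one,
    level_eq min_v (max_v + 1) 5 (by norm_num), level_eq min_v (max_v + 1) 20 (by norm_num),
    level_eq min_v (max_v + 1) 100 (by norm_num), level_eq min_v (max_v + 1) 200 (by norm_num)]
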